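-- pv_equiv track=rewrite | github.com/xfx1993/goto1000 | test25.py | breakfastNumber
-- ===== SOURCE A (Python) =====
-- def breakfastNumber( staple, drinks, x):
--     """
--     :type staple: List[int]
--     :type drinks: List[int]
--     :type x: int
--     :rtype: int
--     """
--     staple.sort()
--     drinks.sort()
--
--     count = 0
--     row = len(staple)
--     col = len(drinks)
--     for i in range(row):
--         if staple[i]>x:
--             break
--         target = x-staple[i]
--         left = 0
--         right = col
--         while left<right:
--             mid =(left+right)//2
--             if drinks[mid]<=target:
--                 left = mid+1
--             else:
--                 right =mid
--         count+=left
--     return count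
-- ===== SOURCE B (Python) =====
-- def breakfastNumber(staple, drinks, x):
--     staple.sort()
--     drinks.sort()
--     count = 0
--     j = len(drinks) - 1
--     for s in staple:
--         if s > x:
--             break
--         target = x - s
--         while j >= 0 and drinks[j] > target:
--             j -= 1
--         count += j + 1
--     return count
-- ===== Notes on version B (the rewrite author's own statement) =====
-- stated objective: faster
-- what changed: Replaces the per-staple binary search over drinks with a single two-pointer sweep: one pointer walks the sorted staples upward while a second pointer over the sorted drinks only ever moves down, so all searches together cost O(m) instead of O(n log m).
import Mathlib
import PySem

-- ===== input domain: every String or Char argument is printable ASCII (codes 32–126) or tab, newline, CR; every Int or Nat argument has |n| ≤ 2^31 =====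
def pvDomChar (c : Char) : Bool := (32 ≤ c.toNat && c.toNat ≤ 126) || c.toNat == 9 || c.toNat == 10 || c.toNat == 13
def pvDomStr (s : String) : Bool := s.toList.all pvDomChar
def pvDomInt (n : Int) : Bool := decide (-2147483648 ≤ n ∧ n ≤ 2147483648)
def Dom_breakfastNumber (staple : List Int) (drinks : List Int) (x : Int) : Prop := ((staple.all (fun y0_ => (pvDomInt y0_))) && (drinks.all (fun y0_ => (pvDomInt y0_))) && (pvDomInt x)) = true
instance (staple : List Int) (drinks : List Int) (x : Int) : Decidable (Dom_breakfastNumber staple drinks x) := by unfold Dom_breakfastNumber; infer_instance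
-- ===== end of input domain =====

-- B replaces A's per-staple binary search by a single downward two-pointer sweep over the
-- sorted drinks (objective: faster searches overall). Both A and B sort the two list
-- arguments in place in Python (identical mutation); the theorems are about the return value.

-- ===== PORT A =====
-- the inner 'while left<right' binary search; drinks[mid] is always in range in every run
-- (left ≤ mid < right ≤ len), so getD is exact there
def pvBsA (drinks : List Int) (target : Int) (left right : Nat) : Nat :=
  if _h : left < right then
    let mid := (left + right) / 2
    if drinks.getD mid 0 ≤ target then pvBsA drinks target (mid + 1) right
    else pvBsA drinks target left mid
  else left
termination_by right - left
decreasing_by all_goals omega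

-- the 'for i in range(row)' loop with its break, over the sorted staple list
def pvLoopA (drinks : List Int) (x : Int) : List Int → Int → Int
  | [], count => count
  | s :: rest, count =>
    if s > x then count
    else pvLoopA drinks x rest (count + (pvBsA drinks (x - s) 0 drinks.length : Int))

def breakfastNumber (staple : List Int) (drinks : List Int) (x : Int) : Int :=
  pvLoopA (PySem.List.sorted drinks (fun a => a) false) x
    (PySem.List.sorted staple (fun a => a) false) 0

-- ===== PORT B =====
-- the 'while j >= 0 and drinks[j] > target' pointer decrement; drinks[j] is always in range
-- in every run (0 ≤ j < len), so getD is exact there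
def pvDecB (drinks : List Int) (target : Int) (j : Int) : Int :=
  if h : 0 ≤ j ∧ target < drinks.getD j.toNat 0 then pvDecB drinks target (j - 1) else j
termination_by (j + 1).toNat
decreasing_by omega

-- the 'for s in staple' loop with its break, carrying count and the pointer j
def pvLoopB (drinks : List Int) (x : Int) : List Int → Int → Int → Int
  | [], count, _ => count
  | s :: rest, count, j =>
    if s > x then count
    else
      let j' := pvDecB drinks (x - s) j
      pvLoopB drinks x rest (count + j' + 1) j'

def breakfastNumber_alt (staple : List Int) (drinks : List Int) (x : Int) : Int :=
  pvLoopB (PySem.List.sorted drinks (fun a => a) false) x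
    (PySem.List.sorted staple (fun a => a) false) 0
    ((PySem.List.sorted drinks (fun a => a) false).length - 1)

-- ===== PRECONDITION & SPEC =====
def Spec_breakfastNumber (staple : List Int) (drinks : List Int) (x : Int) (out : Int) : Prop := out = breakfastNumber_alt staple drinks x
instance (staple : List Int) (drinks : List Int) (x : Int) (out : Int) : Decidable (Spec_breakfastNumber staple drinks x out) := by unfold Spec_breakfastNumber; infer_instance

-- ===== CLAIM (what is proved, stated in full; the proofs are below) =====
def Claim_equal_breakfastNumber : Prop := ∀ (staple : List Int) (drinks : List Int) (x : Int), Dom_breakfastNumber staple drinks x → Spec_breakfastNumber staple drinks x (breakfastNumber staple drinks x)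

-- ===== LEMMAS AND PROOFS =====

-- number of drinks ≤ t (what one binary search of A counts, and what B's pointer j+1 tracks)
def pvCnt (d : List Int) (t : Int) : Nat := d.countP (fun v => decide (v ≤ t))

theorem pvCnt_le_length (d : List Int) (t : Int) : pvCnt d t ≤ d.length :=
  List.countP_le_length

theorem pv_getD_mono {d : List Int} (hd : d.Pairwise (· ≤ ·)) {i j : Nat}
    (hij : i ≤ j) (hj : j < d.length) : d.getD i 0 ≤ d.getD j 0 := by
  rcases Nat.eq_or_lt_of_le hij with rfl | hlt
  · exact le_refl _
  · rw [List.getD_eq_getElem d 0 (Nat.lt_of_le_of_lt hij hj), List.getD_eq_getElem d 0 hj]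
    exact (List.pairwise_iff_getElem.mp hd) i j _ hj hlt

-- on a sorted list, pvCnt is the split point: everything below it is ≤ t, at or above it is > t
theorem pvCnt_split {d : List Int} (hd : d.Pairwise (· ≤ ·)) (t : Int) :
    (∀ k : Nat, k < pvCnt d t → d.getD k 0 ≤ t) ∧
    (∀ k : Nat, pvCnt d t ≤ k → k < d.length → t < d.getD k 0) := by
  induction d with
  | nil => exact ⟨fun k hk => by simp [pvCnt] at hk, fun k _ hk => by simp at hk⟩
  | cons a rest ih =>
    have hrest := ih (List.Pairwise.sublist (List.sublist_cons_self a rest) hd)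
    have hha : ∀ y ∈ rest, a ≤ y := fun y hy => (List.pairwise_cons.mp hd).1 y hy
    by_cases hat : a ≤ t
    · have hc : pvCnt (a :: rest) t = pvCnt rest t + 1 := by
        simp [pvCnt, hat]
      constructor
      · intro k hk
        match k with
        | 0 => simpa using hat
        | Nat.succ m =>
          have := hrest.1 m (by omega)
          simpa using this
      · intro k hk1 hk2
        match k with
        | 0 => omega
        | Nat.succ m =>
          have := hrest.2 m (by omega) (by simpa using hk2)
          simpa using this
    · have h0 : pvCnt rest t = 0 := by
        rw [pvCnt, List.countP_eq_zero]
        intro y hy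
        simp only [decide_eq_true_eq]
        exact fun h => hat (le_trans (hha y hy) h)
      have hc : pvCnt (a :: rest) t = 0 := by
        rw [pvCnt, List.countP_cons]
        rw [pvCnt] at h0
        simp [hat, h0]
      constructor
      · intro k hk
        omega
      · intro k hk1 hk2
        match k with
        | 0 => simpa using lt_of_not_ge hat
        | Nat.succ m =>
          have := hrest.2 m (by omega) (by simpa using hk2)
          simpa using this

-- the split point is unique
theorem pv_split_unique {d : List Int} {t : Int} {n : Nat}
    (hn : n ≤ d.length)
    (h1 : ∀ k : Nat, k < n → d.getD k 0 ≤ t)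
    (h2 : ∀ k : Nat, n ≤ k → k < d.length → t < d.getD k 0)
    (hd : d.Pairwise (· ≤ ·)) : n = pvCnt d t := by
  obtain ⟨c1, c2⟩ := pvCnt_split hd t
  have hc : pvCnt d t ≤ d.length := pvCnt_le_length d t
  by_contra hne
  rcases Nat.lt_or_ge n (pvCnt d t) with h | h
  · exact absurd (c1 n h) (not_le.mpr (h2 n (le_refl n) (by omega)))
  · have hlt : pvCnt d t < n := by omega
    exact absurd (h1 (pvCnt d t) hlt) (not_le.mpr (c2 _ (le_refl _) (by omega)))

-- A's binary search computes the split point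
theorem pvBsA_eq_cnt {d : List Int} (hd : d.Pairwise (· ≤ ·)) (t : Int) :
    ∀ (left right : Nat), left ≤ right → right ≤ d.length →
    (∀ k : Nat, k < left → d.getD k 0 ≤ t) →
    (∀ k : Nat, right ≤ k → k < d.length → t < d.getD k 0) →
    pvBsA d t left right = pvCnt d t := by
  intro left right
  induction left, right using pvBsA.induct d t with
  | case1 left right h mid hle ih =>
    intro hlr hrl h1 h2
    rw [pvBsA]
    simp only [h, dite_true]
    rw [if_pos hle]
    exact ih (by omega) hrl
      (fun k hk => le_trans (pv_getD_mono hd (by omega) (by omega)) hle) h2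
  | case2 left right h mid hgt ih =>
    intro hlr hrl h1 h2
    rw [pvBsA]
    simp only [h, dite_true]
    rw [if_neg hgt]
    exact ih (by omega) (by omega) h1
      (fun k hk1 hk2 => lt_of_lt_of_le (lt_of_not_ge hgt) (pv_getD_mono hd (by omega) hk2))
  | case3 left right h =>
    intro hlr hrl h1 h2
    rw [pvBsA]
    simp only [h, dite_false]
    have heq : left = right := by omega
    subst heq
    exact pv_split_unique hrl h1 h2 hd

-- B's pointer decrement lands one below the split point
theorem pvDecB_eq_cnt {d : List Int} (hd : d.Pairwise (· ≤ ·)) (t : Int) :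
    ∀ (j : Int), -1 ≤ j → j < (d.length : Int) →
    (∀ k : Nat, j < (k : Int) → k < d.length → t < d.getD k 0) →
    pvDecB d t j = (pvCnt d t : Int) - 1 := by
  intro j
  induction j using pvDecB.induct d t with
  | case1 j h ih =>
    intro hj1 hj2 hab
    rw [pvDecB]
    rw [dif_pos h]
    refine ih (by omega) (by omega) ?_
    intro k hk1 hk2
    rcases Nat.lt_or_ge j.toNat k with hlt | hge
    · exact hab k (by omega) hk2
    · exact lt_of_lt_of_le h.2 (pv_getD_mono hd (by omega) hk2)
  | case2 j h =>
    intro hj1 hj2 hab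
    rw [pvDecB]
    simp only [h, dite_false]
    have hsplit : (j + 1).toNat = pvCnt d t := by
      apply pv_split_unique (by omega) ?_ ?_ hd
      · intro k hk
        have hj0 : 0 ≤ j := by omega
        have hjlen : j.toNat < d.length := by omega
        have hdj : d.getD j.toNat 0 ≤ t := by
          by_contra hcon
          exact h ⟨hj0, lt_of_not_ge hcon⟩
        exact le_trans (pv_getD_mono hd (by omega) hjlen) hdj
      · intro k hk1 hk2
        exact hab k (by omega) hk2
    omega

-- the two loops agree, given the pointer invariant
theorem pvLoop_eq {d : List Int} (hd : d.Pairwise (· ≤ ·)) (x : Int) :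
    ∀ (st : List Int), st.Pairwise (· ≤ ·) → ∀ (count j : Int),
    -1 ≤ j → j < (d.length : Int) →
    (∀ s ∈ st, ∀ k : Nat, j < (k : Int) → k < d.length → x - s < d.getD k 0) →
    pvLoopA d x st count = pvLoopB d x st count j := by
  intro st
  induction st with
  | nil => intro _ count j _ _ _; rfl
  | cons s rest ih =>
    intro hst count j hj1 hj2 hab
    by_cases hsx : s > x
    · simp [pvLoopA, pvLoopB, hsx]
    · simp only [pvLoopA, pvLoopB, hsx, if_false]
      have hdec : pvDecB d (x - s) j = (pvCnt d (x - s) : Int) - 1 :=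
        pvDecB_eq_cnt hd (x - s) j hj1 hj2 (hab s List.mem_cons_self)
      have hbs : pvBsA d (x - s) 0 d.length = pvCnt d (x - s) :=
        pvBsA_eq_cnt hd (x - s) 0 d.length (Nat.zero_le _) (le_refl _)
          (fun k hk => by omega) (fun k hk1 hk2 => by omega)
      have hcle := pvCnt_le_length d (x - s)
      have hinv : ∀ s' ∈ rest, ∀ k : Nat,
          ((pvCnt d (x - s) : Int) - 1) < (k : Int) → k < d.length → x - s' < d.getD k 0 := by
        intro s' hs' k hk1 hk2
        have hss' : s ≤ s' := (List.pairwise_cons.mp hst).1 s' hs'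
        have := (pvCnt_split hd (x - s)).2 k (by omega) hk2
        omega
      have hrec := ih (List.Pairwise.sublist (List.sublist_cons_self s rest) hst)
        (count + ((pvCnt d (x - s) : Int) - 1) + 1)
        ((pvCnt d (x - s) : Int) - 1) (by omega) (by omega) hinv
      rw [hbs, hdec, ← hrec]
      congr 1
      omega

-- ===== VERDICT (by name: the statement is the Claim_ definition above) =====
theorem breakfastNumber_spec : Claim_equal_breakfastNumber := by
  intro staple drinks x _
  unfold Spec_breakfastNumber breakfastNumber breakfastNumber_alt
  have hdr : (PySem.List.sorted drinks (fun a => a) false).Pairwise (· ≤ ·) :=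
    PySem.List.sorted_pairwise drinks (fun a => a)
  have hst : (PySem.List.sorted staple (fun a => a) false).Pairwise (· ≤ ·) :=
    PySem.List.sorted_pairwise staple (fun a => a)
  exact pvLoop_eq hdr x _ hst 0 _ (by omega) (by omega)
    (fun s _ k hk1 hk2 => by omega)
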